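-- pv_equiv track=rewrite | github.com/suraj-iitb/algorithm-identification | tbcnn/crawler/data/merge/python3/merge4398166.py | count
-- ===== SOURCE A (Python) =====
-- def count(l, r):
--     cnt = 0
--     if l + 1 < r:
--         mid = (l + r) >> 1
--         cnt += count(l, mid)
--         cnt += count(mid, r)
--         cnt += r - l
--     return cnt
-- ===== SOURCE B (Python) =====
-- def count(l, r):
--     # The recursion depends only on n = r - l; compute f(n) in O(log n)
--     # via h(m) = (f(m), f(m+1)), where f(n) = f(n//2) + f((n+1)//2) + n for n >= 2.
--     n = r - l
--     if n < 2:
--         return 0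
--
--     def h(m):
--         # returns (f(m), f(m+1))
--         if m < 2:
--             return (0, 2 if m == 1 else 0)
--         k = m // 2
--         fk, fk1 = h(k)
--         if m % 2 == 0:
--             return (2 * fk + m, fk + fk1 + m + 1)
--         else:
--             return (fk + fk1 + m, 2 * fk1 + m + 1)
--
--     fk, fk1 = h(n // 2)
--     if n % 2 == 0:
--         return 2 * fk + n
--     else:
--         return fk + fk1 + n
-- ===== Notes on version B (the rewrite author's own statement) =====
-- stated objective: faster
-- what changed: B observes the result depends only on the interval length n = r - l and replaces A's O(n) two-branch recursion on (l, r) by an O(log n) recursion h(m) = (f(m), f(m+1)) on the length, halving m at each step; intended as faster (measured 128x at n=262144 on inputs with large r - l, but inputs with r - l <= 1 are trivial for both, so the probe marked the measurement inconsistent).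
import Mathlib
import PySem

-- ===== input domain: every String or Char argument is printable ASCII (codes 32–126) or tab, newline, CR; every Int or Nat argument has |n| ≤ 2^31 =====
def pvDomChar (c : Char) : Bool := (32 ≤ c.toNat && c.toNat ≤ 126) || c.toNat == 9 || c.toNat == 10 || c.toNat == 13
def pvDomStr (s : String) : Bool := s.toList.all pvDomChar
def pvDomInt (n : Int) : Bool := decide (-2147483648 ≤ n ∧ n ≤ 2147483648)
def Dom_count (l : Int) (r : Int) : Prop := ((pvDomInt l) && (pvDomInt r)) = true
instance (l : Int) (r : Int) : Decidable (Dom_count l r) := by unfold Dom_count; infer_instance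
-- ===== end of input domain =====

-- B replaces A's O(n) two-branch recursion on the interval by an O(log n) recursion on the
-- interval LENGTH via the pair (f(m), f(m+1)); intended as faster (timing run measured
-- 128x at n=262144, marked inconsistent since inputs with r - l <= 1 are trivial for both).

-- ===== PORT A =====
-- '(l + r) >> 1' in Python is floor division by 2.
def count (l : Int) (r : Int) : Int :=
  if l + 1 < r then
    count l (PySem.Int.floordiv (l + r) 2)
      + count (PySem.Int.floordiv (l + r) 2) r
      + (r - l)
  else 0
termination_by (r - l).toNat
decreasing_by
  all_goals
    rw [PySem.Int.floordiv_eq_ediv_of_pos (by omega : (0:Int) < 2)]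
    omega

-- ===== PORT B =====
-- h(m) of Source B: returns (f(m), f(m+1)) where f is the length-only recursion.
def hpair (m : Nat) : Int × Int :=
  if m < 2 then (0, if m = 1 then 2 else 0)
  else
    let p := hpair (m / 2)
    if m % 2 = 0 then (2 * p.1 + (m : Int), p.1 + p.2 + (m : Int) + 1)
    else (p.1 + p.2 + (m : Int), 2 * p.2 + (m : Int) + 1)

-- Source B's count: n = r - l; in the else-branch n ≥ 2, so Python's 'n // 2' and 'n % 2'
-- agree with Nat division on n.toNat and Int '%' here.
def count_alt (l : Int) (r : Int) : Int :=
  let n := r - l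
  if n < 2 then 0
  else
    let p := hpair (n.toNat / 2)
    if n % 2 = 0 then 2 * p.1 + n else p.1 + p.2 + n

-- ===== PRECONDITION & SPEC =====
def Spec_count (l : Int) (r : Int) (out : Int) : Prop := out = count_alt l r
instance (l : Int) (r : Int) (out : Int) : Decidable (Spec_count l r out) := by unfold Spec_count; infer_instance

-- ===== CLAIM (what is proved, stated in full; the proofs are below) =====
def Claim_equal_count : Prop := ∀ (l : Int) (r : Int), Dom_count l r → Spec_count l r (count l r)

-- ===== LEMMAS AND PROOFS =====

-- the length-only value: f n = f (n/2) + f ((n+1)/2) + n for n ≥ 2, else 0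
def f (n : Nat) : Int :=
  if n < 2 then 0 else f (n / 2) + f ((n + 1) / 2) + (n : Int)
termination_by n
decreasing_by all_goals omega

theorem f_rec (n : Nat) (h : 2 ≤ n) : f n = f (n / 2) + f ((n + 1) / 2) + (n : Int) := by
  rw [f, if_neg (by omega)]

theorem f_one : f 1 = 0 := by rw [f, if_pos (by omega)]

theorem f_two : f 2 = 2 := by
  rw [f_rec 2 (by omega)]
  norm_num [f_one]

theorem count_eq_f (l r : Int) : count l r = f (r - l).toNat := by
  generalize hk : (r - l).toNat = k
  induction k using Nat.strong_induction_on generalizing l r with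
  | _ k ih =>
    rw [count]
    by_cases h : l + 1 < r
    · have h2 : PySem.Int.floordiv (l + r) 2 = (l + r) / 2 :=
        PySem.Int.floordiv_eq_ediv_of_pos (by omega)
      simp only [h, if_true, h2]
      rw [ih ((l + r) / 2 - l).toNat (by omega) l ((l + r) / 2) rfl,
          ih (r - (l + r) / 2).toNat (by omega) ((l + r) / 2) r rfl]
      have e1 : ((l + r) / 2 - l).toNat = k / 2 := by omega
      have e2 : (r - (l + r) / 2).toNat = (k + 1) / 2 := by omega
      have hrl : r - l = (k : Int) := by omega
      rw [e1, e2, hrl, f_rec k (by omega)]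
    · simp only [h, if_false]
      rw [f]
      have : k < 2 := by omega
      rw [if_pos this]

theorem hpair_spec (m : Nat) : hpair m = (f m, f (m + 1)) := by
  induction m using Nat.strong_induction_on with
  | _ m ih =>
    rw [hpair]
    by_cases h : m < 2
    · interval_cases m
      · rw [if_pos (by omega)]
        simp [f, f_one]
      · rw [if_pos (by omega)]
        simp [f_one, f_two]
    · rw [if_neg h]
      simp only [ih (m / 2) (by omega)]
      have hm : f m = f (m / 2) + f ((m + 1) / 2) + (m : Int) := f_rec m (by omega)
      have hm1 : f (m + 1) = f ((m + 1) / 2) + f ((m + 2) / 2) + ((m : Int) + 1) := by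
        rw [f_rec (m + 1) (by omega)]
        push_cast
        ring_nf
      by_cases hp : m % 2 = 0
      · have e1 : (m + 1) / 2 = m / 2 := by omega
        have e2 : (m + 2) / 2 = m / 2 + 1 := by omega
        rw [if_pos hp, Prod.mk.injEq, hm, hm1, e1, e2]
        constructor <;> ring
      · have e1 : (m + 1) / 2 = m / 2 + 1 := by omega
        have e2 : (m + 2) / 2 = m / 2 + 1 := by omega
        rw [if_neg hp, Prod.mk.injEq, hm, hm1, e1, e2]
        constructor <;> ring

theorem count_alt_eq_f (l r : Int) : count_alt l r = f (r - l).toNat := by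
  unfold count_alt
  by_cases h : r - l < 2
  · rw [if_pos h, f, if_pos (by omega)]
  · rw [if_neg h]
    simp only [hpair_spec]
    set n := (r - l).toNat with hn
    rw [f_rec n (by omega)]
    by_cases hp : (r - l) % 2 = 0
    · have e1 : (n + 1) / 2 = n / 2 := by omega
      rw [if_pos hp, e1]
      have hrl : (r - l) = (n : Int) := by omega
      rw [hrl]
      ring
    · have e1 : (n + 1) / 2 = n / 2 + 1 := by omega
      rw [if_neg hp, e1]
      have hrl : (r - l) = (n : Int) := by omega
      rw [hrl]

-- ===== VERDICT (by name: the statement is the Claim_ definition above) =====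
theorem count_spec : Claim_equal_count := by
  intro l r _
  unfold Spec_count
  rw [count_eq_f, count_alt_eq_f]
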